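-- pv_equiv track=rewrite | github.com/danny-smith-0/advent_of_code_2022 | source/day_23.py | get_elf_grid
-- ===== SOURCE A (Python) =====
-- def get_elf_grid(elves):
--     min_north = min([elf[0] for elf in elves])
--     max_north = max([elf[0] for elf in elves])
--     min_east = min([elf[1] for elf in elves])
--     max_east = max([elf[1] for elf in elves])
--
--     north_width = max_north - min_north + 1
--     east_width = max_east - min_east + 1
--     grid = [ ['.'] * east_width for _ in range(north_width)]
--     for elf in elves:
--         grid[-(elf[0] - max_north)][elf[1] - min_east] = '#'
--     return grid, north_width, east_width
-- ===== SOURCE B (Python) =====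
-- def get_elf_grid(elves):
--     min_north = min(elf[0] for elf in elves)
--     max_north = max(elf[0] for elf in elves)
--     min_east = min(elf[1] for elf in elves)
--     max_east = max(elf[1] for elf in elves)
--
--     north_width = max_north - min_north + 1
--     east_width = max_east - min_east + 1
--     occupied = {(elf[0], elf[1]) for elf in elves}
--     grid = [['#' if (max_north - r, min_east + c) in occupied else '.'
--              for c in range(east_width)]
--             for r in range(north_width)]
--     return grid, north_width, east_width
-- ===== Notes on version B (the rewrite author's own statement) =====
-- stated objective: alternative
-- what changed: Instead of pre-filling a dot grid and mutating cells by scanning elves, B builds a set of elf coordinates once and constructs the grid directly with a nested comprehension over cell indices, querying the set per cell.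
import Mathlib
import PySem

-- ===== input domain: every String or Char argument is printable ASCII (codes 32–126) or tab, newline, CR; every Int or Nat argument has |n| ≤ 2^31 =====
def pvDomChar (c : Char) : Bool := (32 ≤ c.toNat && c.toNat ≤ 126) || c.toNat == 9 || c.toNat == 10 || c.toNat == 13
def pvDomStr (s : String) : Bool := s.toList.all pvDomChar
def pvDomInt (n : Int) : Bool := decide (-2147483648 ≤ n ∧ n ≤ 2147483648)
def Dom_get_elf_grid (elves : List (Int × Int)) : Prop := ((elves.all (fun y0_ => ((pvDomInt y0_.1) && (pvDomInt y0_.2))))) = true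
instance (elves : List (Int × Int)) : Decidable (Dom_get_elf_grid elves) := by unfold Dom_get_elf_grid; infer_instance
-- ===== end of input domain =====

-- B builds a set of elf coordinates and constructs the grid directly by a nested
-- comprehension over cell indices, instead of mutating a pre-filled dot grid per elf.

-- ===== PORT A =====
def get_elf_grid (elves : List (Int × Int)) : List (List String) × Int × Int :=
  match PySem.List.min? (elves.map (fun elf => elf.1)) (fun x => x),
        PySem.List.max? (elves.map (fun elf => elf.1)) (fun x => x),
        PySem.List.min? (elves.map (fun elf => elf.2)) (fun x => x),
        PySem.List.max? (elves.map (fun elf => elf.2)) (fun x => x) with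
  | some min_north, some max_north, some min_east, some max_east =>
    let north_width := max_north - min_north + 1
    let east_width := max_east - min_east + 1
    let grid := (PySem.List.pyRange 0 north_width 1).map
      (fun _ => List.replicate east_width.toNat ".")
    let grid := elves.foldl (fun g elf =>
      PySem.List.pySetD g (-(elf.1 - max_north))
        (PySem.List.pySetD (PySem.List.pyGetD g (-(elf.1 - max_north)) [])
          (elf.2 - min_east) "#")) grid
    (grid, north_width, east_width)
  | _, _, _, _ => ([], 0, 0)   -- unreachable under Pre_ (min/max raise ValueError on [])

-- ===== PORT B =====
def get_elf_grid_alt (elves : List (Int × Int)) : List (List String) × Int × Int :=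
  (PySem.List.min? (elves.map (fun elf => elf.1)) (fun x => x)).elim ([], 0, 0) (fun min_north =>
  (PySem.List.max? (elves.map (fun elf => elf.1)) (fun x => x)).elim ([], 0, 0) (fun max_north =>
  (PySem.List.min? (elves.map (fun elf => elf.2)) (fun x => x)).elim ([], 0, 0) (fun min_east =>
  (PySem.List.max? (elves.map (fun elf => elf.2)) (fun x => x)).elim ([], 0, 0) (fun max_east =>
    let north_width := max_north - min_north + 1
    let east_width := max_east - min_east + 1
    let occupied := PySem.Set.ofList (elves.map (fun elf => (elf.1, elf.2)))
    let grid := (PySem.List.pyRange 0 north_width 1).map (fun r =>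
      (PySem.List.pyRange 0 east_width 1).map (fun c =>
        if PySem.Set.contains occupied (max_north - r, min_east + c) then "#" else "."))
    (grid, north_width, east_width)))))
    -- the ([], 0, 0) defaults are unreachable under Pre_ (min/max raise ValueError on [])

-- ===== PRECONDITION & SPEC =====
-- Pre_ excludes only the empty list, on which Python's min() raises ValueError.
def Pre_get_elf_grid (elves : List (Int × Int)) : Prop := elves ≠ []
instance (elves : List (Int × Int)) : Decidable (Pre_get_elf_grid elves) := by unfold Pre_get_elf_grid; infer_instance

def pvWitness_get_elf_grid : (List (Int × Int)) := [(0, 1), (2, -1)]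

def Spec_get_elf_grid (elves : List (Int × Int)) (out : List (List String) × Int × Int) : Prop := out = get_elf_grid_alt elves
instance (elves : List (Int × Int)) (out : List (List String) × Int × Int) : Decidable (Spec_get_elf_grid elves out) := by unfold Spec_get_elf_grid; infer_instance

-- ===== CLAIM (what is proved, stated in full; the proofs are below) =====
def Claim_equal_get_elf_grid : Prop := ∀ (elves : List (Int × Int)), Dom_get_elf_grid elves → Pre_get_elf_grid elves → Spec_get_elf_grid elves (get_elf_grid elves)



-- ===== LEMMAS AND PROOFS =====

-- the per-elf update A performs on the grid
def pvUpd (maxN mE : Int) (g : List (List String)) (elf : Int × Int) : List (List String) :=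
  PySem.List.pySetD g (-(elf.1 - maxN))
    (PySem.List.pySetD (PySem.List.pyGetD g (-(elf.1 - maxN)) []) (elf.2 - mE) "#")

theorem pvUpd_eq_set (maxN mE : Int) (g : List (List String)) (elf : Int × Int)
    (h0 : 0 ≤ maxN - elf.1) (h1 : (maxN - elf.1).toNat < g.length)
    (h2 : 0 ≤ elf.2 - mE) :
    pvUpd maxN mE g elf =
      g.set (maxN - elf.1).toNat
        ((g.getD (maxN - elf.1).toNat []).set (elf.2 - mE).toNat "#") := by
  unfold pvUpd
  rw [neg_sub]
  rw [PySem.List.pySetD_of_nonneg _ _ h0]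
  congr 1
  have hget : PySem.List.pyGetD g (maxN - elf.1) ([] : List String)
      = g.getD (maxN - elf.1).toNat [] := by
    rw [PySem.List.pyGetD_eq_getElem _ _ h0 (by omega)]
    rw [List.getD_eq_getElem g [] h1]
  rw [hget, PySem.List.pySetD_of_nonneg _ _ h2]

-- cell lookup
def pvCell (g : List (List String)) (r c : Nat) : Option String :=
  g[r]?.bind (fun row => row[c]?)

theorem pvFold_spec (maxN mE : Int) (xs : List (Int × Int)) (g : List (List String)) (M : Nat)
    (hrow : ∀ row ∈ g, row.length = M)
    (hb : ∀ e ∈ xs, 0 ≤ maxN - e.1 ∧ (maxN - e.1).toNat < g.length ∧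
          0 ≤ e.2 - mE ∧ (e.2 - mE).toNat < M) :
    (xs.foldl (pvUpd maxN mE) g).length = g.length ∧
    (∀ row ∈ xs.foldl (pvUpd maxN mE) g, row.length = M) ∧
    (∀ r c : Nat, r < g.length → c < M →
      pvCell (xs.foldl (pvUpd maxN mE) g) r c =
        if ∃ e ∈ xs, (maxN - e.1).toNat = r ∧ (e.2 - mE).toNat = c then some "#"
        else pvCell g r c) := by
  induction xs generalizing g with
  | nil =>
    refine ⟨rfl, hrow, fun r c hr hc => ?_⟩
    simp
  | cons e xs ih =>
    obtain ⟨he0, he1, he2, he3⟩ := hb e (List.mem_cons_self ..)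
    have hset := pvUpd_eq_set maxN mE g e he0 he1 he2
    have hrowE : (g.getD (maxN - e.1).toNat []).length = M := by
      rw [List.getD_eq_getElem g [] he1]
      exact hrow _ (List.getElem_mem he1)
    have hlen2 : (pvUpd maxN mE g e).length = g.length := by
      rw [hset, List.length_set]
    have hrow2 : ∀ row ∈ pvUpd maxN mE g e, row.length = M := by
      intro row hmem
      rw [hset] at hmem
      rcases List.mem_or_eq_of_mem_set hmem with h | h
      · exact hrow _ h
      · rw [h, List.length_set]; exact hrowE
    have hb2 : ∀ e' ∈ xs, 0 ≤ maxN - e'.1 ∧ (maxN - e'.1).toNat < (pvUpd maxN mE g e).length ∧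
          0 ≤ e'.2 - mE ∧ (e'.2 - mE).toNat < M := by
      intro e' h; rw [hlen2]; exact hb e' (List.mem_cons_of_mem _ h)
    obtain ⟨ihl, ihr, ihc⟩ := ih (pvUpd maxN mE g e) hrow2 hb2
    refine ⟨by rw [List.foldl_cons, ihl, hlen2],
            by rw [List.foldl_cons]; exact ihr, fun r c hr hc => ?_⟩
    rw [List.foldl_cons, ihc r c (by omega) hc]
    have hcell2 : pvCell (pvUpd maxN mE g e) r c =
        if (maxN - e.1).toNat = r ∧ (e.2 - mE).toNat = c then some "#" else pvCell g r c := by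
      unfold pvCell
      rw [hset, List.getElem?_set]
      by_cases hR : (maxN - e.1).toNat = r
      · subst hR
        rw [if_pos rfl, if_pos he1]
        rw [Option.bind_some, List.getElem?_set]
        by_cases hC : (e.2 - mE).toNat = c
        · rw [if_pos hC, if_pos (by rw [hrowE]; omega), if_pos ⟨rfl, hC⟩]
        · rw [if_neg hC, if_neg (fun h => hC h.2)]
          rw [List.getD_eq_getElem g [] he1, List.getElem?_eq_getElem he1, Option.bind_some]
      · rw [if_neg hR, if_neg (fun h => hR h.1)]
    rw [hcell2]
    by_cases hx : ∃ e' ∈ xs, (maxN - e'.1).toNat = r ∧ (e'.2 - mE).toNat = c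
    · rw [if_pos hx, if_pos ⟨_, List.mem_cons_of_mem _ hx.choose_spec.1, hx.choose_spec.2⟩]
    · rw [if_neg hx]
      by_cases hh : (maxN - e.1).toNat = r ∧ (e.2 - mE).toNat = c
      · rw [if_pos hh, if_pos ⟨e, List.mem_cons_self .., hh⟩]
      · rw [if_neg hh, if_neg]
        rintro ⟨e', he', hcond⟩
        rcases List.mem_cons.mp he' with h | h
        · exact hh (h ▸ hcond)
        · exact hx ⟨e', h, hcond⟩

-- ===== VERDICT (by name: the statement is the Claim_ definition above) =====
theorem get_elf_grid_spec : Claim_equal_get_elf_grid := by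
  intro elves _ hne
  unfold Spec_get_elf_grid get_elf_grid get_elf_grid_alt
  have hmap1 : elves.map (fun elf => elf.1) ≠ [] := by simpa using hne
  have hmap2 : elves.map (fun elf => elf.2) ≠ [] := by simpa using hne
  cases h1 : PySem.List.min? (elves.map (fun elf => elf.1)) (fun x => x) with
  | none => exact absurd ((PySem.List.min?_eq_none_iff _ _).mp h1) hmap1
  | some mN =>
  cases h2 : PySem.List.max? (elves.map (fun elf => elf.1)) (fun x => x) with
  | none => exact absurd ((PySem.List.max?_eq_none_iff _ _).mp h2) hmap1
  | some maxN =>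
  cases h3 : PySem.List.min? (elves.map (fun elf => elf.2)) (fun x => x) with
  | none => exact absurd ((PySem.List.min?_eq_none_iff _ _).mp h3) hmap2
  | some mE =>
  cases h4 : PySem.List.max? (elves.map (fun elf => elf.2)) (fun x => x) with
  | none => exact absurd ((PySem.List.max?_eq_none_iff _ _).mp h4) hmap2
  | some maxE =>
  dsimp only [Option.elim]
  -- facts about the extrema
  have hmN : ∀ p ∈ elves, mN ≤ p.1 := fun p hp =>
    PySem.List.min?_isMin h1 p.1 (List.mem_map_of_mem hp)
  have hmaxN : ∀ p ∈ elves, p.1 ≤ maxN := fun p hp =>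
    PySem.List.max?_isMax h2 p.1 (List.mem_map_of_mem hp)
  have hmE : ∀ p ∈ elves, mE ≤ p.2 := fun p hp =>
    PySem.List.min?_isMin h3 p.2 (List.mem_map_of_mem hp)
  have hmaxE : ∀ p ∈ elves, p.2 ≤ maxE := fun p hp =>
    PySem.List.max?_isMax h4 p.2 (List.mem_map_of_mem hp)
  set nwN : Nat := (maxN - mN + 1).toNat with hnwN
  set ewN : Nat := (maxE - mE + 1).toNat with hewN
  set g0 : List (List String) :=
    (PySem.List.pyRange 0 (maxN - mN + 1) 1).map (fun _ => List.replicate ewN ".") with hg0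
  have hg0len : g0.length = nwN := by
    rw [hg0, List.length_map, PySem.List.length_pyRange_one, sub_zero]
  have hg0row : ∀ row ∈ g0, row.length = ewN := by
    intro row hmem
    rw [hg0] at hmem
    obtain ⟨_, _, hr⟩ := List.mem_map.mp hmem
    rw [← hr, List.length_replicate]
  have hb' : ∀ e ∈ elves, 0 ≤ maxN - e.1 ∧ (maxN - e.1).toNat < g0.length ∧
      0 ≤ e.2 - mE ∧ (e.2 - mE).toNat < ewN := by
    intro e he
    have l1 := hmN e he; have l2 := hmaxN e he; have l3 := hmE e he; have l4 := hmaxE e he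
    rw [hg0len]
    refine ⟨by omega, by omega, by omega, by omega⟩
  obtain ⟨hL, hRows, hC⟩ := pvFold_spec maxN mE elves g0 ewN hg0row hb'
  -- the two grids agree cell by cell
  refine Prod.ext ?_ rfl
  change List.foldl (pvUpd maxN mE) g0 elves = _
  apply List.ext_getElem?
  intro r
  by_cases hr : r < nwN
  · rw [List.getElem?_map, PySem.List.getElem?_pyRange_one]
    rw [if_pos (by rw [sub_zero]; exact hr), Option.map_some]
    -- A row r
    have hAlen : (elves.foldl (pvUpd maxN mE) g0).length = nwN := by rw [hL, hg0len]
    have hAr : r < (elves.foldl (pvUpd maxN mE) g0).length := by omega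
    rw [List.getElem?_eq_getElem hAr]
    congr 1
    have hArow : (elves.foldl (pvUpd maxN mE) g0)[r] ∈ elves.foldl (pvUpd maxN mE) g0 :=
      List.getElem_mem hAr
    have hArl : ((elves.foldl (pvUpd maxN mE) g0)[r]).length = ewN := hRows _ hArow
    apply List.ext_getElem?
    intro c
    rw [List.getElem?_map, PySem.List.getElem?_pyRange_one]
    by_cases hc : c < ewN
    · rw [if_pos (by rw [sub_zero]; exact hc), Option.map_some]
      have hcell := hC r c (by omega) hc
      have hlhs : ((elves.foldl (pvUpd maxN mE) g0)[r])[c]? =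
          pvCell (elves.foldl (pvUpd maxN mE) g0) r c := by
        unfold pvCell
        rw [List.getElem?_eq_getElem hAr, Option.bind_some]
      rw [hlhs, hcell]
      have hcell0 : pvCell g0 r c = some "." := by
        unfold pvCell
        rw [hg0, List.getElem?_map, PySem.List.getElem?_pyRange_one,
          if_pos (by rw [sub_zero]; exact hr), Option.map_some, Option.bind_some,
          List.getElem?_replicate, if_pos hc]
      rw [hcell0]
      have hmem_eq : ∀ x : Int × Int,
          (PySem.Set.contains (PySem.Set.ofList (elves.map (fun elf => (elf.1, elf.2)))) x = true)
            ↔ x ∈ elves := by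
        intro x
        rw [PySem.Set.contains_iff, PySem.Set.mem_ofList]
        constructor
        · intro hx
          obtain ⟨e, he, hex⟩ := List.mem_map.mp hx
          exact hex ▸ he
        · intro hx
          exact List.mem_map.mpr ⟨x, hx, rfl⟩
      by_cases hmem : (maxN - (0 + (r : Int)), mE + (0 + (c : Int))) ∈ elves
      · rw [if_pos, if_pos ((hmem_eq _).mpr hmem)]
        refine ⟨(maxN - (0 + (r : Int)), mE + (0 + (c : Int))), hmem, ?_, ?_⟩ <;>
          simp only [] <;> omega
      · rw [if_neg, if_neg (fun h => hmem ((hmem_eq _).mp h))]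
        rintro ⟨e, he, hre, hce⟩
        have l1 := hmaxN e he; have l2 := hmE e he
        have he1 : e.1 = maxN - (0 + (r : Int)) := by omega
        have he2 : e.2 = mE + (0 + (c : Int)) := by omega
        exact hmem (by rw [← he1, ← he2]; exact he)
    · rw [if_neg (by rw [sub_zero]; exact hc),
          List.getElem?_eq_none (by rw [hArl]; omega)]
      rfl
  · rw [List.getElem?_eq_none (by rw [hL, hg0len]; omega),
        List.getElem?_eq_none (by rw [List.length_map, PySem.List.length_pyRange_one, sub_zero]; omega)]
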